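-- pv_equiv track=rewrite | github.com/TonyZhang2004/Character_Table_of_Symmetric_Groups | verify_character_table.py | parse_integer_row
-- ===== SOURCE A (Python) =====
-- from typing import Dict, Iterable, List, Optional, Sequence, Set
--
-- MAX_REPORTED_ERRORS = 10
--
-- def add_error(errors: List[str], message: str) -> None:
--     if len(errors) < MAX_REPORTED_ERRORS:
--         errors.append(message)
--
-- def parse_integer_row(raw_row: Sequence[str], row_index: int, errors: List[str]):
--     parsed = []
--     for col_index, value in enumerate(raw_row):
--         try:
--             parsed.append(int(value))
--         except ValueError:
--             add_error(
--                 errors,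
--                 f"row {row_index}, column {col_index}: cannot parse integer {value!r}",
--             )
--             return None
--     return parsed
-- ===== SOURCE B (Python) =====
-- def _try_int(value):
--     try:
--         return int(value)
--     except ValueError:
--         return None
--
-- def parse_integer_row(raw_row, row_index, errors):
--     # Staged: map every cell to Optional[int] first, then inspect the list of options.
--     opts = [_try_int(v) for v in raw_row]
--     if all(o is not None for o in opts):
--         return opts
--     bad = next(i for i, o in enumerate(opts) if o is None)
--     if len(errors) < 10:
--         errors.append(
--             f"row {row_index}, column {bad}: cannot parse integer {raw_row[bad]!r}"
--         )
--     return None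
-- ===== Notes on version B (the rewrite author's own statement) =====
-- stated objective: alternative
-- what changed: B replaces A's single accumulator loop with early return by a staged pipeline: map each cell to an Optional int, then return the list iff every option is present, locating the first failing column only afterwards for the error message.
import Mathlib
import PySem

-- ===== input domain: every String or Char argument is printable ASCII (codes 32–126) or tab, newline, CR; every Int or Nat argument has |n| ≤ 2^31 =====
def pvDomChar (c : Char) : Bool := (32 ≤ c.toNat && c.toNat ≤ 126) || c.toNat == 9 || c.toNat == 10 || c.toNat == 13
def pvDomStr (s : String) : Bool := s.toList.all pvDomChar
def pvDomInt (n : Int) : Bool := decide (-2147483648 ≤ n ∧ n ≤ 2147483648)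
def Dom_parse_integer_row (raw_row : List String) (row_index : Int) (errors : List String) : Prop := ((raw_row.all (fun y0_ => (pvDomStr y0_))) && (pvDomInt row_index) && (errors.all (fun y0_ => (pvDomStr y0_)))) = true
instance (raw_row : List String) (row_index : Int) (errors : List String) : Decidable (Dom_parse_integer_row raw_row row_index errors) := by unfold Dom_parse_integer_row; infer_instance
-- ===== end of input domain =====

-- B replaces the accumulator loop by a staged map-then-check pipeline; equivalence is about the RETURN value only —
-- both Pythons mutate `errors` identically (first bad column's message), modelled here as a read-only parameter.

-- ===== PORT A =====
-- A: single loop over enumerate(raw_row) with accumulator `parsed`, early `return None`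
-- on the first ValueError (add_error only mutates `errors`, not the return value).
def parse_integer_row_go (rest : List String) (col_index : Nat) (parsed : List Int) : Option (List Int) :=
  match rest with
  | [] => some parsed
  | value :: rest' =>
    match PySem.Int.ofStr? value with
    | some n => parse_integer_row_go rest' (col_index + 1) (parsed ++ [n])
    | none => none  -- add_error(errors, f"row {row_index}, column {col_index}: …"); return None

def parse_integer_row (raw_row : List String) (row_index : Int) (errors : List String) : Option (List Int) :=
  parse_integer_row_go raw_row 0 []

-- ===== PORT B =====
-- B: opts = [_try_int(v) for v in raw_row]; return opts if all present, else None
-- (the `bad = next(…)`/append only mutates `errors`).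
def parse_integer_row_alt (raw_row : List String) (row_index : Int) (errors : List String) : Option (List Int) :=
  let opts := raw_row.map PySem.Int.ofStr?
  if opts.all Option.isSome then
    some (opts.filterMap id)
  else
    none  -- bad := first index with opts[bad] = none; append the error message; return None

-- ===== PRECONDITION & SPEC =====
def Spec_parse_integer_row (raw_row : List String) (row_index : Int) (errors : List String) (out : Option (List Int)) : Prop := out = parse_integer_row_alt raw_row row_index errors
instance (raw_row : List String) (row_index : Int) (errors : List String) (out : Option (List Int)) : Decidable (Spec_parse_integer_row raw_row row_index errors out) := by unfold Spec_parse_integer_row; infer_instance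

-- ===== CLAIM (what is proved, stated in full; the proofs are below) =====
def Claim_equal_parse_integer_row : Prop := ∀ (raw_row : List String) (row_index : Int) (errors : List String), Dom_parse_integer_row raw_row row_index errors → Spec_parse_integer_row raw_row row_index errors (parse_integer_row raw_row row_index errors)

-- ===== LEMMAS AND PROOFS =====
theorem parse_integer_row_go_eq (rest : List String) (col_index : Nat) (parsed : List Int) :
    parse_integer_row_go rest col_index parsed =
      if (rest.map PySem.Int.ofStr?).all Option.isSome then
        some (parsed ++ (rest.map PySem.Int.ofStr?).filterMap id)
      else none := by
  induction rest generalizing col_index parsed with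
  | nil => simp [parse_integer_row_go]
  | cons v rest ih =>
    simp only [parse_integer_row_go, List.map_cons, List.all_cons]
    cases h : PySem.Int.ofStr? v with
    | none => simp
    | some n => simp [ih, List.append_assoc]

-- ===== VERDICT (by name: the statement is the Claim_ definition above) =====
theorem parse_integer_row_spec : Claim_equal_parse_integer_row := by
  intro raw_row row_index errors _
  unfold Spec_parse_integer_row parse_integer_row parse_integer_row_alt
  rw [parse_integer_row_go_eq]
  simp
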